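-- pv_equiv track=rewrite | github.com/lazy-fortran/standard | tests/fortran_2003/test_issue24_semantic_c_interop.py | verify_token_sequence
-- ===== SOURCE A (Python) =====
-- def verify_token_sequence(tokens, required_sequence):
--     """Verify that required token sequence appears in order"""
--     sequence_lower = [t.lower() for t in required_sequence]
--
--     # Find all positions of first token
--     start_positions = [i for i, token in enumerate(tokens) if token == sequence_lower[0]]
--
--     for start_pos in start_positions:
--         # Check if full sequence matches from this position
--         if start_pos + len(sequence_lower) <= len(tokens):
--             matches = True
--             for i, required_token in enumerate(sequence_lower):
--                 if tokens[start_pos + i] != required_token: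
--                     matches = False
--                     break
--             if matches:
--                 return True
--
--     return False
-- ===== SOURCE B (Python) =====
-- def verify_token_sequence(tokens, required_sequence):
--     """Verify that required token sequence appears in order"""
--     seq = [t.lower() for t in required_sequence]
--     ts = tokens
--     while True:
--         if len(ts) < len(seq):
--             return False
--         if ts[:len(seq)] == seq:
--             return True
--         ts = ts[1:]
-- ===== Notes on version B (the rewrite author's own statement) =====
-- stated objective: simpler
-- what changed: B replaces A's two-phase search (collect all indices of the first token, then verify each candidate element-by-element with a guard and a matches flag) with a single sliding-window scan that compares the whole window slice against the lowered sequence at every offset.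
-- outside the precondition, e.g. on verify_token_sequence([], []): A returns False, B returns True
import Mathlib
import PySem

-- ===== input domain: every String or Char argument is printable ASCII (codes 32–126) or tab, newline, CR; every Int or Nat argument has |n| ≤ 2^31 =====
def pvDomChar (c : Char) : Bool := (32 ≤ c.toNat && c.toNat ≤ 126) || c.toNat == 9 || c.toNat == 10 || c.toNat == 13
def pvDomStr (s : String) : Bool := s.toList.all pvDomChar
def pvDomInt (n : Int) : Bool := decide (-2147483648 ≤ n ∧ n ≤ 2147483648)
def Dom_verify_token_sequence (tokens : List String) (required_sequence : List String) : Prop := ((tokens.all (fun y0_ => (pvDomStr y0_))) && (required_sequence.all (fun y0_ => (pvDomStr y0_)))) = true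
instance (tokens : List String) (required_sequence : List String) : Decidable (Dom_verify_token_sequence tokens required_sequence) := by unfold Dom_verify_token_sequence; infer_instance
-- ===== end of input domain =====

-- B is a single sliding-window scan instead of A's two-phase first-token-index search; equivalence is on the return value (neither mutates its arguments).

-- ===== PORT A =====
-- inner loop 'for i, required_token in enumerate(sequence_lower): if tokens[start_pos+i] != required_token: matches=False; break'
-- (the index is in range whenever the outer guard holds; out-of-range pyGet? yields none ≠ some rt, i.e. no match)
def pvCheckA (tokens : List String) (pos : Int) : List String → Int → Bool
  | [], _ => true
  | rt :: rest, i =>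
    if PySem.List.pyGet? tokens (pos + i) = some rt then pvCheckA tokens pos rest (i + 1)
    else false

-- 'for start_pos in start_positions: if start_pos + len(sequence_lower) <= len(tokens): … if matches: return True'
def pvOuterA (tokens seqLower : List String) : List Int → Bool
  | [] => false
  | p :: rest =>
    if p + (seqLower.length : Int) ≤ (tokens.length : Int) then
      if pvCheckA tokens p seqLower 0 then true else pvOuterA tokens seqLower rest
    else pvOuterA tokens seqLower rest

def verify_token_sequence (tokens : List String) (required_sequence : List String) : Bool :=
  let sequence_lower := required_sequence.map PySem.Str.lower
  match sequence_lower with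
  | [] => false  -- Python raises IndexError reading sequence_lower[0]; excluded by Pre_
  | s0 :: _ =>
    let start_positions :=
      ((PySem.List.enumerate tokens 0).filter (fun p => p.2 == s0)).map (fun p => p.1)
    pvOuterA tokens sequence_lower start_positions

-- ===== PORT B =====
-- the while loop of Source B: ts walks the suffixes of tokens; ts[:len(seq)] is (take seq.length)
def pvSearchB (seq : List String) : List String → Bool
  | [] =>
    if ([] : List String).length < seq.length then false
    else if ([] : List String).take seq.length = seq then true
    else false  -- unreachable: on [] one of the two tests above fires
  | t :: rest =>
    if (t :: rest).length < seq.length then false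
    else if (t :: rest).take seq.length = seq then true
    else pvSearchB seq rest

def verify_token_sequence_alt (tokens : List String) (required_sequence : List String) : Bool :=
  pvSearchB (required_sequence.map PySem.Str.lower) tokens

-- ===== PRECONDITION & SPEC =====
-- Pre_ excludes the empty required_sequence: there A raises IndexError (sequence_lower[0]) whenever tokens is non-empty, and on ([], []) it skips the scan and returns False while B returns True — a degenerate corner where either answer is defensible.
def Pre_verify_token_sequence (tokens : List String) (required_sequence : List String) : Prop :=
  required_sequence ≠ []
instance (tokens : List String) (required_sequence : List String) : Decidable (Pre_verify_token_sequence tokens required_sequence) := by unfold Pre_verify_token_sequence; infer_instance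

def pvWitness_verify_token_sequence : List String × List String := (["use", "iso_c_binding"], ["use", "iso_c_binding"])

def Spec_verify_token_sequence (tokens : List String) (required_sequence : List String) (out : Bool) : Prop := out = verify_token_sequence_alt tokens required_sequence
instance (tokens : List String) (required_sequence : List String) (out : Bool) : Decidable (Spec_verify_token_sequence tokens required_sequence out) := by unfold Spec_verify_token_sequence; infer_instance

-- ===== CLAIM (what is proved, stated in full; the proofs are below) =====
def Claim_equal_verify_token_sequence : Prop := ∀ (tokens : List String) (required_sequence : List String), Dom_verify_token_sequence tokens required_sequence → Pre_verify_token_sequence tokens required_sequence → Spec_verify_token_sequence tokens required_sequence (verify_token_sequence tokens required_sequence)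

-- ===== LEMMAS AND PROOFS =====

-- B returns true iff the (lowered) sequence is a prefix of some suffix of the tokens.
theorem pvSearchB_iff (seq : List String) : ∀ (ts : List String),
    pvSearchB seq ts = true ↔ ∃ n : Nat, seq <+: ts.drop n := by
  intro ts
  induction ts with
  | nil =>
    simp only [pvSearchB, List.length_nil, List.take_nil, List.drop_nil]
    rcases seq with _ | ⟨a, s⟩
    · simp
    · simp
  | cons t rest ih =>
    simp only [pvSearchB]
    split_ifs with h1 h2
    · constructor
      · intro h; cases h
      · rintro ⟨n, hp⟩
        exfalso
        have := hp.length_le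
        simp [List.length_drop] at this
        simp at h1
        omega
    · constructor
      · intro _; exact ⟨0, by simpa [List.prefix_iff_eq_take] using h2.symm⟩
      · intro _; rfl
    · rw [ih]
      constructor
      · rintro ⟨n, hp⟩; exact ⟨n + 1, by simpa using hp⟩
      · rintro ⟨n, hp⟩
        cases n with
        | zero =>
          exfalso; apply h2
          have := (List.prefix_iff_eq_take).1 (by simpa using hp)
          exact this.symm
        | succ m => exact ⟨m, by simpa using hp⟩

-- A's inner check at position p: the sequence matches element-wise iff it is a prefix of (drop p).
theorem pvCheckA_iff (tokens : List String) : ∀ (seq : List String) (p i : Nat),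
    pvCheckA tokens (p : Int) seq (i : Int) = true ↔ seq <+: tokens.drop (p + i) := by
  intro seq
  induction seq with
  | nil => intro p i; simp [pvCheckA]
  | cons rt rest ih =>
    intro p i
    simp only [pvCheckA]
    have hcast : (p : Int) + (i : Int) = ((p + i : Nat) : Int) := by push_cast; ring
    rw [hcast, PySem.List.pyGet?_natCast]
    by_cases hg : tokens[p + i]? = some rt
    · have hlt : p + i < tokens.length := (List.getElem?_eq_some_iff.1 hg).1
      have hdrop : tokens.drop (p + i) = rt :: tokens.drop (p + i + 1) := by
        rw [List.drop_eq_getElem_cons hlt]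
        congr 1
        exact (List.getElem?_eq_some_iff.1 hg).2
      rw [if_pos hg]
      have hci : ((i : Int) + 1) = ((i + 1 : Nat) : Int) := by push_cast; ring
      rw [hci, ih p (i + 1)]
      rw [hdrop, List.cons_prefix_cons]
      constructor
      · intro h; exact ⟨rfl, by simpa [Nat.add_assoc] using h⟩
      · rintro ⟨-, h⟩; simpa [Nat.add_assoc] using h
    · rw [if_neg hg]
      constructor
      · intro h; cases h
      · intro hp
        exfalso
        rcases List.cons_prefix_iff.1 hp with ⟨t, hEq, -⟩
        apply hg
        have : (tokens.drop (p + i))[0]? = some rt := by rw [hEq]; rfl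
        simpa using this

-- A's outer loop: true iff some listed position passes the guard and the check.
theorem pvOuterA_iff (tokens seqLower : List String) : ∀ (ps : List Int),
    pvOuterA tokens seqLower ps = true ↔
      ∃ p ∈ ps, p + (seqLower.length : Int) ≤ (tokens.length : Int) ∧
        pvCheckA tokens p seqLower 0 = true := by
  intro ps
  induction ps with
  | nil => simp [pvOuterA]
  | cons p rest ih =>
    simp only [pvOuterA]
    split_ifs with h1 h2
    · simp [h1, h2]
    · rw [ih]
      constructor
      · rintro ⟨q, hq, h⟩; exact ⟨q, List.mem_cons_of_mem _ hq, h⟩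
      · rintro ⟨q, hq, hg, hc⟩
        rcases List.mem_cons.1 hq with rfl | hq'
        · exact absurd hc (by simpa using h2)
        · exact ⟨q, hq', hg, hc⟩
    · rw [ih]
      constructor
      · rintro ⟨q, hq, h⟩; exact ⟨q, List.mem_cons_of_mem _ hq, h⟩
      · rintro ⟨q, hq, hg, hc⟩
        rcases List.mem_cons.1 hq with rfl | hq'
        · exact absurd hg h1
        · exact ⟨q, hq', hg, hc⟩

-- membership in A's start_positions list
theorem pvMemPositions (s0 : String) : ∀ (xs : List String) (s : Nat) (q : Int),
    q ∈ ((PySem.List.enumerate xs (s : Int)).filter (fun p => p.2 == s0)).map (fun p => p.1) ↔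
      ∃ n : Nat, q = ((s + n : Nat) : Int) ∧ xs[n]? = some s0 := by
  intro xs
  induction xs with
  | nil => intro s q; simp [PySem.List.enumerate_nil]
  | cons x rest ih =>
    intro s q
    rw [PySem.List.enumerate_cons]
    have hc : (s : Int) + 1 = ((s + 1 : Nat) : Int) := by push_cast; ring
    by_cases hx : x = s0
    · simp only [List.filter_cons, hx, beq_self_eq_true, if_pos, List.map_cons, List.mem_cons]
      rw [hc, ih (s + 1) q]
      constructor
      · rintro (rfl | ⟨n, rfl, hn⟩)
        · exact ⟨0, by simp, by simp⟩
        · refine ⟨n + 1, ?_, ?_⟩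
          · push_cast; ring
          · simpa using hn
      · rintro ⟨n, rfl, hn⟩
        cases n with
        | zero => left; push_cast; ring
        | succ m =>
          right
          refine ⟨m, ?_, ?_⟩
          · push_cast; ring
          · simpa using hn
    · simp only [List.filter_cons]
      rw [if_neg (by simpa using hx)]
      rw [hc, ih (s + 1) q]
      constructor
      · rintro ⟨n, rfl, hn⟩
        refine ⟨n + 1, ?_, ?_⟩
        · push_cast; ring
        · simpa using hn
      · rintro ⟨n, rfl, hn⟩
        cases n with
        | zero =>
          exfalso
          apply hx
          have h : some x = some s0 := by simpa using hn
          exact Option.some.inj h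
        | succ m =>
          refine ⟨m, ?_, ?_⟩
          · push_cast; ring
          · simpa using hn

-- ===== VERDICT (by name: the statement is the Claim_ definition above) =====
theorem verify_token_sequence_spec : Claim_equal_verify_token_sequence := by
  intro tokens req _ hpre
  unfold Spec_verify_token_sequence
  rw [Bool.eq_iff_iff]
  unfold verify_token_sequence verify_token_sequence_alt
  cases hm : req.map PySem.Str.lower with
  | nil => exact absurd (List.map_eq_nil_iff.1 hm) hpre
  | cons s0 rest =>
    rw [pvSearchB_iff, pvOuterA_iff]
    constructor
    · rintro ⟨p, hp, hg, hc⟩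
      rcases (pvMemPositions s0 tokens 0 p).1 hp with ⟨n, rfl, hn⟩
      have h0 : ((0 + n : Nat) : Int) = ((n : Nat) : Int) := by push_cast; ring
      have hc' : pvCheckA tokens ((n : Nat) : Int) (s0 :: rest) ((0 : Nat) : Int) = true := by
        rw [← h0]; simpa using hc
      have := (pvCheckA_iff tokens (s0 :: rest) n 0).1 hc'
      exact ⟨n, by simpa using this⟩
    · rintro ⟨n, hp⟩
      have hlen := hp.length_le
      rw [List.length_drop] at hlen
      rcases List.cons_prefix_iff.1 hp with ⟨t, hEq, -⟩
      have hn : tokens[n]? = some s0 := by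
        have h0 : (tokens.drop n)[0]? = some s0 := by rw [hEq]; rfl
        simpa using h0
      have hnlt : n < tokens.length := (List.getElem?_eq_some_iff.1 hn).1
      refine ⟨((n : Nat) : Int), ?_, ?_, ?_⟩
      · exact (pvMemPositions s0 tokens 0 ((n : Nat) : Int)).2 ⟨n, by push_cast; ring, hn⟩
      · simp only [List.length_cons]
        simp only [List.length_cons] at hlen
        push_cast
        omega
      · have : pvCheckA tokens ((n : Nat) : Int) (s0 :: rest) ((0 : Nat) : Int) = true :=
          (pvCheckA_iff tokens (s0 :: rest) n 0).2 (by simpa using hp)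
        simpa using this
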